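-- pv_equiv track=rewrite | github.com/RMWinslow/RMWinslow.github.io | Script/CollapsibleAnimals/animallisttohtml.py | htmlCollapsibleFormat
-- ===== SOURCE A (Python) =====
-- def getLineData(line):
--     depth = 0
--     while line[:4] == '    ':
--         depth += 1
--         line = line[4:]
--     return depth, line
--
-- def getTextData(textblock):
--     lines = textblock.split('\n')
--     depths = []
--     contents = []
--     for line in lines:
--         depths.append(getLineData(line)[0])
--         contents.append(getLineData(line)[1])
--     return depths, contents
--
-- def htmlCollapsibleFormat(textblock):
--     """
--     For each item, if the next line is indented, then the line is expandible
--     If the next line is same or lower depth, then item is standalone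
--     If next line is lower depth, then ends the recursion(s).
--     If depth decreases several time, ends several recursions
--     """
--
--     TopText1="<details><summary>"
--     TopText2="</summary><div class='sublist'>"
--     BottomText="</div></details>"
--
--     #Get the depth and contenst of the line
--     depths, contents = getTextData(textblock)
--
--     newtext = ""
--
--     for i, line in enumerate(contents):
--         if i == len(contents)-1:
--             continue
--         else:
--             if depths[i] < depths[i+1]:
--                 "Start of new sublist"
--                 newtext += TopText1 + line + '<br>\n' + TopText2
--             elif depths[i] == depths[i+1]:
--                 "normal entry"
--                 newtext += line + '<br>\n'
--             elif depths[i] > depths[i+1]: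
--                 "End of sublist(s)"
--                 diff = depths[i] - depths[i+1]
--                 newtext += line + '<br>\n' + BottomText*diff
--
--     return newtext
-- ===== SOURCE B (Python) =====
-- def htmlCollapsibleFormat(textblock):
--     """Closed-form depth (leading-spaces // 4) and a single adjacent-pairs pass
--     over zip(pairs, pairs[1:]) instead of index bookkeeping; same output."""
--     TopText1 = "<details><summary>"
--     TopText2 = "</summary><div class='sublist'>"
--     BottomText = "</div></details>"
--     pairs = []
--     for line in textblock.split('\n'):
--         d = (len(line) - len(line.lstrip(' '))) // 4
--         pairs.append((d, line[4 * d:]))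
--     out = []
--     for (d, line), (nd, _) in zip(pairs, pairs[1:]):
--         if d < nd:
--             out.append(TopText1 + line + '<br>\n' + TopText2)
--         elif d == nd:
--             out.append(line + '<br>\n')
--         else:
--             out.append(line + '<br>\n' + BottomText * (d - nd))
--     return ''.join(out)
-- ===== Notes on version B (the rewrite author's own statement) =====
-- stated objective: simpler
-- what changed: Depth is computed in closed form as leading-spaces//4 instead of a 4-space-stripping while loop, and the output is emitted in one pass over adjacent (depth,content) pairs via zip(pairs, pairs[1:]) instead of an index-based loop over two parallel lists with an explicit last-line check.
import Mathlib
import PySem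

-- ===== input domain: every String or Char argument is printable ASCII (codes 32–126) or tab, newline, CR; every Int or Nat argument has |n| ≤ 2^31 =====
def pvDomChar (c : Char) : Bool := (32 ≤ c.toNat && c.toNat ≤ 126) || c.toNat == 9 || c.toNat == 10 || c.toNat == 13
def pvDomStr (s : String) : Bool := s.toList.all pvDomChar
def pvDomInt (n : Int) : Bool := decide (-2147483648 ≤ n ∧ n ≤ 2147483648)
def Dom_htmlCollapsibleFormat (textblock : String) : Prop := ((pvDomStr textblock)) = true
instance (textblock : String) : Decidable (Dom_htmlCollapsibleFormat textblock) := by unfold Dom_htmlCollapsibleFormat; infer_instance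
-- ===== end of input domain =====

-- B replaces A's 4-space-stripping while loop by a closed-form depth (leading-spaces count / 4)
-- and replaces A's index-based enumerate loop over parallel depth/content lists by a single
-- pass over adjacent pairs (zip pairs pairs.tail); objective: simpler.


-- ===== PORT A =====
-- getLineData's while loop: strip '    ' prefixes, counting them
def pvStripLoop (depth : Nat) (line : List Char) : Nat × List Char :=
  if line.take 4 = [' ', ' ', ' ', ' '] then pvStripLoop (depth + 1) (line.drop 4)
  else (depth, line)
termination_by line.length
decreasing_by
  rename_i h
  have : 4 ≤ line.length := by
    by_contra hlt
    have := congrArg List.length h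
    simp [List.length_take] at this
    omega
  simp [List.length_drop]; omega

def pvGetLineData (line : List Char) : Nat × List Char := pvStripLoop 0 line

-- getTextData: build depths and contents by appending per line
def pvGetTextData (textblock : String) : List Nat × List (List Char) :=
  (PySem.Chars.splitOn textblock.toList ['\n']).foldl
    (fun dc line => (dc.1 ++ [(pvGetLineData line).1], dc.2 ++ [(pvGetLineData line).2]))
    ([], [])

def htmlCollapsibleFormat (textblock : String) : String :=
  let dc := pvGetTextData textblock
  let depths := dc.1
  let contents := dc.2
  let n := PySem.List.len contents
  let newtext := (PySem.List.enumerate contents).foldl (fun newtext il =>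
    if il.1 == n - 1 then newtext
    else
      if PySem.List.pyGetD depths il.1 0 < PySem.List.pyGetD depths (il.1 + 1) 0 then
        newtext ++ "<details><summary>".toList ++ il.2 ++ "<br>\n".toList ++ "</summary><div class='sublist'>".toList
      else if PySem.List.pyGetD depths il.1 0 == PySem.List.pyGetD depths (il.1 + 1) 0 then
        newtext ++ il.2 ++ "<br>\n".toList
      else
        newtext ++ il.2 ++ "<br>\n".toList ++
          (List.replicate (PySem.List.pyGetD depths il.1 0 - PySem.List.pyGetD depths (il.1 + 1) 0) "</div></details>".toList).flatten) []
  String.ofList newtext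

-- ===== PORT B =====
-- line.lstrip(' ') is exactly dropWhile (· == ' ') (ported by hand; exact for every string)
def pvLinePair (line : List Char) : Nat × List Char :=
  let d := (line.length - (line.dropWhile (· == ' ')).length) / 4
  (d, line.drop (4 * d))

def pvEmit (p q : Nat × List Char) : List Char :=
  if p.1 < q.1 then "<details><summary>".toList ++ p.2 ++ "<br>\n".toList ++ "</summary><div class='sublist'>".toList
  else if p.1 == q.1 then p.2 ++ "<br>\n".toList
  else p.2 ++ "<br>\n".toList ++ (List.replicate (p.1 - q.1) "</div></details>".toList).flatten

def htmlCollapsibleFormat_alt (textblock : String) : String :=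
  let pairs := (PySem.Chars.splitOn textblock.toList ['\n']).map pvLinePair
  let pieces := (pairs.zip pairs.tail).map (fun pq => pvEmit pq.1 pq.2)
  String.ofList pieces.flatten

-- ===== PRECONDITION & SPEC =====
def Spec_htmlCollapsibleFormat (textblock : String) (out : String) : Prop := out = htmlCollapsibleFormat_alt textblock
instance (textblock : String) (out : String) : Decidable (Spec_htmlCollapsibleFormat textblock out) := by unfold Spec_htmlCollapsibleFormat; infer_instance

-- ===== CLAIM (what is proved, stated in full; the proofs are below) =====
def Claim_equal_htmlCollapsibleFormat : Prop := ∀ (textblock : String), Dom_htmlCollapsibleFormat textblock → Spec_htmlCollapsibleFormat textblock (htmlCollapsibleFormat textblock)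

-- ===== LEMMAS AND PROOFS =====

-- B's zip-of-adjacent-pairs pass, written as a structural recursion
def pvG : List (Nat × List Char) → List (List Char)
  | p :: q :: t => pvEmit p q :: pvG (q :: t)
  | _ => []

theorem pvG_eq_zip (ps : List (Nat × List Char)) :
    (ps.zip ps.tail).map (fun pq => pvEmit pq.1 pq.2) = pvG ps := by
  match ps with
  | [] => rfl
  | [p] => rfl
  | p :: q :: t =>
    simp only [List.tail_cons, List.zip_cons_cons, List.map_cons, pvG]
    exact congrArg _ (pvG_eq_zip (q :: t))

theorem take4_iff (cs : List Char) :
    cs.take 4 = [' ', ' ', ' ', ' '] ↔ 4 ≤ (cs.takeWhile (· == ' ')).length := by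
  match cs with
  | [] => simp
  | [a] => cases h : a == ' ' <;> simp [List.takeWhile, h]
  | [a,b] => cases h : a == ' ' <;> cases h2 : b == ' ' <;> simp [List.takeWhile, h, h2]
  | [a,b,c] => cases h : a == ' ' <;> cases h2 : b == ' ' <;> cases h3 : c == ' ' <;> simp [List.takeWhile, h, h2, h3]
  | a :: b :: c :: d :: t =>
    cases h : a == ' ' <;> cases h2 : b == ' ' <;> cases h3 : c == ' ' <;> cases h4 : d == ' ' <;>
      simp [List.takeWhile, h, h2, h3, h4] <;> simp_all

theorem pvStripLoop_eq (d : Nat) (cs : List Char) :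
    pvStripLoop d cs =
      (d + (cs.takeWhile (· == ' ')).length / 4,
       cs.drop (4 * ((cs.takeWhile (· == ' ')).length / 4))) := by
  rw [pvStripLoop]
  split
  · rename_i h
    obtain ⟨t, ht⟩ : ∃ t, cs = ' ' :: ' ' :: ' ' :: ' ' :: t := by
      refine ⟨cs.drop 4, ?_⟩
      conv_lhs => rw [← List.take_append_drop 4 cs, h]
      rfl
    subst ht
    simp only [List.drop_succ_cons, List.drop_zero]
    rw [pvStripLoop_eq (d+1) t]
    have htw : ((' ' :: ' ' :: ' ' :: ' ' :: t).takeWhile (· == ' ')).length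
        = 4 + (t.takeWhile (· == ' ')).length := by simp [List.takeWhile]; omega
    rw [htw]
    have harith : (4 + (t.takeWhile (· == ' ')).length) / 4 = 1 + (t.takeWhile (· == ' ')).length / 4 := by omega
    rw [harith]
    have h2 : 4 * (1 + (t.takeWhile (· == ' ')).length / 4) = 4 * ((t.takeWhile (· == ' ')).length / 4) + 4 := by ring
    rw [h2]
    refine Prod.ext (by simp; omega) ?_
    simp [List.drop_succ_cons]
  · rename_i h
    have hlt : (cs.takeWhile (· == ' ')).length < 4 := by
      by_contra hge
      exact h ((take4_iff cs).mpr (by omega))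
    have h0 : (cs.takeWhile (· == ' ')).length / 4 = 0 := by omega
    rw [h0]
    rfl
termination_by cs.length
decreasing_by subst ht; simp; omega

theorem pvGetLineData_eq (cs : List Char) : pvGetLineData cs = pvLinePair cs := by
  unfold pvGetLineData pvLinePair
  rw [pvStripLoop_eq]
  have : (cs.takeWhile (· == ' ')).length = cs.length - (cs.dropWhile (· == ' ')).length := by
    have h := congrArg List.length (List.takeWhile_append_dropWhile (p := (· == ' ')) (l := cs))
    rw [List.length_append] at h
    omega
  simp [this]

theorem pvFoldPair {β γ : Type} (xs : List (List Char)) (f : List Char → β) (g : List Char → γ) :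
    ∀ (a : List β) (b : List γ),
    (xs.foldl (fun dc l => (dc.1 ++ [f l], dc.2 ++ [g l])) (a, b))
      = (a ++ xs.map f, b ++ xs.map g) := by
  induction xs with
  | nil => simp
  | cons x t ih => intro a b; simp [ih (a ++ [f x]) (b ++ [g x])]

theorem pvGetTextData_eq (textblock : String) :
    pvGetTextData textblock =
      (((PySem.Chars.splitOn textblock.toList ['\n']).map pvLinePair).map Prod.fst,
       ((PySem.Chars.splitOn textblock.toList ['\n']).map pvLinePair).map Prod.snd) := by
  unfold pvGetTextData
  rw [pvFoldPair _ _ _ [] []]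
  simp [pvGetLineData_eq]

-- the invariant of A's enumerate loop
theorem pvLoop_eq (n : Int) (dpre dsuf : List Nat) (csuf : List (List Char)) (acc : List Char)
    (hn : n = dpre.length + dsuf.length)
    (hlen : dsuf.length = csuf.length) :
    (PySem.List.enumerate csuf (dpre.length : Int)).foldl (fun newtext il =>
      if il.1 == n - 1 then newtext
      else
        if PySem.List.pyGetD (dpre ++ dsuf) il.1 0 < PySem.List.pyGetD (dpre ++ dsuf) (il.1 + 1) 0 then
          newtext ++ "<details><summary>".toList ++ il.2 ++ "<br>\n".toList ++ "</summary><div class='sublist'>".toList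
        else if PySem.List.pyGetD (dpre ++ dsuf) il.1 0 == PySem.List.pyGetD (dpre ++ dsuf) (il.1 + 1) 0 then
          newtext ++ il.2 ++ "<br>\n".toList
        else
          newtext ++ il.2 ++ "<br>\n".toList ++
            (List.replicate (PySem.List.pyGetD (dpre ++ dsuf) il.1 0 - PySem.List.pyGetD (dpre ++ dsuf) (il.1 + 1) 0) "</div></details>".toList).flatten) acc
      = acc ++ (pvG (dsuf.zip csuf)).flatten := by
  induction dsuf generalizing dpre csuf acc with
  | nil =>
    have : csuf = [] := by simpa using hlen.symm
    subst this
    simp [PySem.List.enumerate, pvG]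
  | cons d0 drest ih =>
    match csuf, hlen with
    | c0 :: crest, hlen =>
      rw [PySem.List.enumerate_cons, List.foldl_cons]
      match drest, crest, hlen with
      | [], [], _ =>
        have hk : ((dpre.length : Int) == n - 1) = true := by simp at hn ⊢; omega
        simp only [hk, if_pos]
        simp [PySem.List.enumerate, pvG]
      | d1 :: dr2, c1 :: cr2, hlen2 =>
        have hk : ((dpre.length : Int) == n - 1) = false := by
          simp at hn ⊢; simp [hn]; omega
        have hget0 : PySem.List.pyGetD (dpre ++ d0 :: d1 :: dr2) (dpre.length : Int) 0 = d0 := by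
          rw [PySem.List.pyGetD_natCast]
          rw [List.getD_append_right _ _ _ _ (le_refl _)]
          simp
        have hget1 : PySem.List.pyGetD (dpre ++ d0 :: d1 :: dr2) ((dpre.length : Int) + 1) 0 = d1 := by
          have : (dpre.length : Int) + 1 = ((dpre.length + 1 : Nat) : Int) := by push_cast; ring
          rw [this, PySem.List.pyGetD_natCast]
          rw [List.getD_append_right _ _ _ _ (by omega)]
          simp
        simp only [hk, Bool.false_eq_true, if_false, hget0, hget1]
        have hstep : ∀ (a : List Char),
            (if d0 < d1 then a ++ "<details><summary>".toList ++ c0 ++ "<br>\n".toList ++ "</summary><div class='sublist'>".toList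
             else if d0 == d1 then a ++ c0 ++ "<br>\n".toList
             else a ++ c0 ++ "<br>\n".toList ++ (List.replicate (d0 - d1) "</div></details>".toList).flatten)
            = a ++ pvEmit (d0, c0) (d1, c1) := by
          intro a; unfold pvEmit; split_ifs <;> simp_all
        rw [hstep]
        have hstart : (dpre.length : Int) + 1 = (((dpre ++ [d0]).length : Nat) : Int) := by
          simp
        rw [hstart]
        have := ih (dpre ++ [d0]) (c1 :: cr2) (acc ++ pvEmit (d0, c0) (d1, c1))
          (by simp at hn ⊢; omega) (by simpa using hlen2)
        rw [show dpre ++ [d0] ++ d1 :: dr2 = dpre ++ d0 :: d1 :: dr2 by simp] at this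
        rw [this]
        simp [pvG]

-- ===== VERDICT (by name: the statement is the Claim_ definition above) =====
theorem htmlCollapsibleFormat_spec : Claim_equal_htmlCollapsibleFormat := by
  intro textblock _
  unfold Spec_htmlCollapsibleFormat htmlCollapsibleFormat htmlCollapsibleFormat_alt
  simp only []
  rw [pvGetTextData_eq]
  simp only []
  set ps := (PySem.Chars.splitOn textblock.toList ['\n']).map pvLinePair with hps
  rw [pvG_eq_zip]
  have hmain := pvLoop_eq (PySem.List.len (ps.map Prod.snd)) [] (ps.map Prod.fst) (ps.map Prod.snd) []
    (by simp [PySem.List.len_eq]) (by simp)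
  simp only [List.length_nil, Nat.cast_zero, List.nil_append] at hmain
  rw [hmain]
  rw [List.zip_map']
  have : (ps.map fun a => (a.1, a.2)) = ps := by simp
  rw [this]
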